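-- pv_equiv track=rewrite | github.com/Rashmitha666/OncoSage | AIAgent_For_Cancer/utils/nlp_processor.py | _are_related
-- ===== SOURCE A (Python) =====
-- def _are_related(word1: str, word2: str) -> bool:
--     """Check if two words are semantically related.
--
--     Args:
--         word1: First word
--         word2: Second word
--
--     Returns:
--         True if words are related, False otherwise
--     """
--     # In a real implementation, this would use word embeddings or a knowledge graph
--     # For demonstration purposes, we'll use a simple string similarity approach
--
--     # Check for common prefixes
--     common_prefix_length = 0
--     for i in range(min(len(word1), len(word2))):
--         if word1[i] == word2[i]:
--             common_prefix_length += 1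
--         else:
--             break
--
--     # Consider related if they share a long common prefix
--     if common_prefix_length >= 5:
--         return True
--
--     return False
-- ===== SOURCE B (Python) =====
-- def _are_related(word1: str, word2: str) -> bool:
--     """Related iff both words have >= 5 chars and share their first five."""
--     return len(word1) >= 5 and len(word2) >= 5 and word1[:5] == word2[:5]
-- ===== Notes on version B (the rewrite author's own statement) =====
-- stated objective: simpler
-- what changed: Replaces the character-by-character prefix-counting loop with a closed-form predicate: both lengths >= 5 and the first five characters equal.
import Mathlib
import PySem

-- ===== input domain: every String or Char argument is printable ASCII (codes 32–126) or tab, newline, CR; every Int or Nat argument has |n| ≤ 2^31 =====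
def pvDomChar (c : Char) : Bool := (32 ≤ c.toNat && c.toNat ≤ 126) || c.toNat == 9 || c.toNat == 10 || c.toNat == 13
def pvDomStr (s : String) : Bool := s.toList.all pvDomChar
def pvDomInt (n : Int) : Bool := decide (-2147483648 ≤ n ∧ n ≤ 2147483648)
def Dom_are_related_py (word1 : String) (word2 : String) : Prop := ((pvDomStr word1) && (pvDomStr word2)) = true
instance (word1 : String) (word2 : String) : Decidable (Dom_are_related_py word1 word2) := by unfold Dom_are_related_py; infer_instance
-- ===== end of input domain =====

-- B replaces A's character-counting loop with a closed-form check (both lengths ≥ 5 and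
-- the first five characters equal); objective: simpler, same observable behaviour.

-- ===== PORT A =====
-- A's loop: walk both words in step, counting matching characters until the first mismatch (break).
def are_related_py_count : List Char → List Char → Nat
  | a :: as, b :: bs => if a = b then 1 + are_related_py_count as bs else 0
  | _, _ => 0

def are_related_py (word1 : String) (word2 : String) : Bool :=
  decide (5 ≤ are_related_py_count word1.toList word2.toList)

-- ===== PORT B =====
-- Source B: len(word1) >= 5 and len(word2) >= 5 and word1[:5] == word2[:5]
def are_related_py_alt (word1 : String) (word2 : String) : Bool :=
  decide (5 ≤ word1.toList.length) && decide (5 ≤ word2.toList.length) &&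
    (word1.toList.take 5 == word2.toList.take 5)

-- ===== PRECONDITION & SPEC =====
def Spec_are_related_py (word1 : String) (word2 : String) (out : Bool) : Prop := out = are_related_py_alt word1 word2
instance (word1 : String) (word2 : String) (out : Bool) : Decidable (Spec_are_related_py word1 word2 out) := by unfold Spec_are_related_py; infer_instance

-- ===== CLAIM (what is proved, stated in full; the proofs are below) =====
def Claim_equal_are_related_py : Prop := ∀ (word1 : String) (word2 : String), Dom_are_related_py word1 word2 → Spec_are_related_py word1 word2 (are_related_py word1 word2)

-- ===== LEMMAS AND PROOFS =====
theorem are_related_count_iff (n : Nat) : ∀ (as bs : List Char),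
    n ≤ are_related_py_count as bs ↔ n ≤ as.length ∧ n ≤ bs.length ∧ as.take n = bs.take n := by
  induction n with
  | zero => intro as bs; simp
  | succ n ih =>
    intro as bs
    cases as with
    | nil => simp [are_related_py_count]
    | cons a as =>
      cases bs with
      | nil => simp [are_related_py_count]
      | cons b bs =>
        by_cases h : a = b
        · subst h
          simp only [are_related_py_count, if_true, List.length_cons, List.take_succ_cons,
            List.cons.injEq, true_and]
          constructor
          · intro h; have := (ih as bs).mp (by omega); exact ⟨by omega, by omega, this.2.2⟩
          · intro h; have := (ih as bs).mpr ⟨by omega, by omega, h.2.2⟩; omega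
        · simp [are_related_py_count, h]

theorem are_related_py_spec : Claim_equal_are_related_py := by
  intro word1 word2 _
  unfold Spec_are_related_py are_related_py are_related_py_alt
  apply Bool.eq_iff_iff.mpr
  simp only [Bool.and_eq_true, decide_eq_true_eq, beq_iff_eq]
  rw [are_related_count_iff]
  tauto
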